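-- pv_equiv track=rewrite | github.com/guanh01/wot | fault_util.py | _get_correctable_indexes
-- ===== SOURCE A (Python) =====
-- from  collections import defaultdict
--
-- def _get_correctable_indexes(indexes, block_size=64, t=1):
--     '''
--     This method gets the bit indexes that can be corrected using ECC.
--     It tries to bucketize the indexes using block_size and check the number of indexes
--     in each bucket. If the bucket contains no more than t number of indices, then these
--     bits can be corrected via ECC.  TODO: This correction strategy is not accurate becuase
--     When #flips >= 3, Standard ECC is supposed to wrongly correct it.
--     This implementation ignore this case.
--
--     Args:
--     	- indexes are bit indexes,
--     	- block_size (int): a data block is default 64.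
--     	- t (int): #errors can be corrected. Default to be one.
--     Return:
--     	- corrected_indexes (set): the indices of bit positions that can be corrected.
--     '''
--     corrected_indexes = set()
--     blocks = defaultdict(list)
--     for index in indexes:
--         blocks[index//block_size].append(index)
--     for block_id, block_faults in blocks.items():
--         if len(block_faults) <= t:
--             for k in block_faults:
--                 corrected_indexes.add(k)
--     return corrected_indexes
-- ===== SOURCE B (Python) =====
-- from collections import Counter
--
-- def _get_correctable_indexes(indexes, block_size=64, t=1):
--     counts = Counter(index // block_size for index in indexes)
--     return {index
--             for block_id, cnt in counts.items()
--             if cnt <= t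
--             for index in indexes
--             if index // block_size == block_id}
-- ===== Notes on version B (the rewrite author's own statement) =====
-- stated objective: alternative
-- what changed: B's first pass keeps only an integer count per block (Counter) instead of materializing each block's member list, and the correctable indexes are then re-derived by rescanning the index list for each block whose count is within t.
import Mathlib
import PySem

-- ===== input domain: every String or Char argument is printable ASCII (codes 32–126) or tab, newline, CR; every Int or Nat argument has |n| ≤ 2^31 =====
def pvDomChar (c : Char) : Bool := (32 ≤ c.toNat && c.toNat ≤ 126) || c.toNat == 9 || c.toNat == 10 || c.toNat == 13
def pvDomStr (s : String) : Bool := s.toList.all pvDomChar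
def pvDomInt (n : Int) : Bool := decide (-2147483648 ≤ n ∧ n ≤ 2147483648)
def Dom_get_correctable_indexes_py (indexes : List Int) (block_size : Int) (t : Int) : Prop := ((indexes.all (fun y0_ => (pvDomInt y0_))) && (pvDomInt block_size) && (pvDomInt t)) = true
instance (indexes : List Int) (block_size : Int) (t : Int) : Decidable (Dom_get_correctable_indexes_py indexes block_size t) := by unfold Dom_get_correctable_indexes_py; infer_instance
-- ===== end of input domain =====

-- B replaces A's per-block member lists by a Counter of per-block counts and re-derives each
-- good block's members by rescanning the index list (alternative decomposition, not claimed faster).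


-- ===== PORT A =====
def get_correctable_indexes_py (indexes : List Int) (block_size : Int) (t : Int) : List Int :=
  let blocks : PySem.Dict Int (List Int) :=
    indexes.foldl (fun d index =>
      d.modify (PySem.Int.floordiv index block_size) [] (fun l => l ++ [index])) PySem.Dict.empty
  blocks.items.foldl (fun corrected p =>
    if (p.2.length : Int) ≤ t then p.2.foldl PySem.Set.add corrected else corrected)
    PySem.Set.empty

-- ===== PORT B =====
def get_correctable_indexes_py_alt (indexes : List Int) (block_size : Int) (t : Int) : List Int :=
  let counts : PySem.Dict Int Int :=
    PySem.Dict.counter (indexes.map (fun index => PySem.Int.floordiv index block_size))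
  counts.items.foldl (fun s p =>
    if p.2 ≤ t then
      indexes.foldl (fun s2 index =>
        if PySem.Int.floordiv index block_size == p.1 then PySem.Set.add s2 index else s2) s
    else s)
    PySem.Set.empty

-- ===== PRECONDITION & SPEC =====
-- Pre_ excludes exactly block_size = 0, where the Python A raises ZeroDivisionError.
def Pre_get_correctable_indexes_py (indexes : List Int) (block_size : Int) (t : Int) : Prop :=
  block_size ≠ 0
instance (indexes : List Int) (block_size : Int) (t : Int) : Decidable (Pre_get_correctable_indexes_py indexes block_size t) := by unfold Pre_get_correctable_indexes_py; infer_instance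
def pvWitness_get_correctable_indexes_py : List Int × Int × Int := ([0, 1, 64], 64, 1)

def Spec_get_correctable_indexes_py (indexes : List Int) (block_size : Int) (t : Int) (out : List Int) : Prop := out = get_correctable_indexes_py_alt indexes block_size t
instance (indexes : List Int) (block_size : Int) (t : Int) (out : List Int) : Decidable (Spec_get_correctable_indexes_py indexes block_size t out) := by unfold Spec_get_correctable_indexes_py; infer_instance

-- ===== CLAIM (what is proved, stated in full; the proofs are below) =====
def Claim_equal_get_correctable_indexes_py : Prop := ∀ (indexes : List Int) (block_size : Int) (t : Int), Dom_get_correctable_indexes_py indexes block_size t → Pre_get_correctable_indexes_py indexes block_size t → Spec_get_correctable_indexes_py indexes block_size t (get_correctable_indexes_py indexes block_size t)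

-- ===== LEMMAS AND PROOFS =====

/-- The first pass of port A: the bucket dict's items are the distinct block ids in
first-occurrence order, each paired with the sublist of `idx` falling in that block. -/
theorem blocks_items_eq (idx : List Int) (key : Int → Int) :
    (idx.foldl (fun d i => d.modify (key i) [] (fun l => l ++ [i])) PySem.Dict.empty).items
      = (PySem.Set.ofList (idx.map key)).map (fun b => (b, idx.filter (fun i => key i == b))) := by
  set D := idx.foldl (fun d i => d.modify (key i) [] (fun l => l ++ [i])) PySem.Dict.empty with hD
  have hkeys : D.keys = PySem.Set.ofList (idx.map key) := by
    rw [hD, PySem.Dict.keys_foldl_modify_key]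
    rfl
  have hnd : D.keys.Nodup := by
    rw [hD]
    exact PySem.Dict.nodup_keys_foldl_modify_key _ _ _ _ _ (by simp [PySem.Dict.keys_empty])
  have hgetD : ∀ b, D.getD b [] = idx.filter (fun i => key i == b) := by
    intro b
    have hmap : D = (idx.map (fun i => (key i, i))).foldl
        (fun d p => d.modify p.1 [] (fun l => l ++ [p.2])) PySem.Dict.empty := by
      rw [hD, List.foldl_map]
    rw [hmap, PySem.Dict.getD_foldl_modify_append]
    simp [List.filter_map, Function.comp_def]
  rw [PySem.Dict.items_eq_map_keys D hnd [], hkeys]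
  exact List.map_congr_left (fun b _ => by rw [hgetD])

/-- A block's multiplicity under `key` is the length of its filtered sublist. -/
theorem count_map_key (idx : List Int) (key : Int → Int) (b : Int) :
    (idx.map key).count b = (idx.filter (fun i => key i == b)).length := by
  rw [List.count_eq_countP, List.countP_map, List.countP_eq_length_filter]
  rfl

-- ===== VERDICT (by name: the statement is the Claim_ definition above) =====
theorem get_correctable_indexes_py_spec : Claim_equal_get_correctable_indexes_py := by
  intro idx bs t _ _
  show get_correctable_indexes_py idx bs t = get_correctable_indexes_py_alt idx bs t
  simp only [get_correctable_indexes_py, get_correctable_indexes_py_alt]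
  rw [blocks_items_eq idx (fun i => PySem.Int.floordiv i bs),
      PySem.Dict.items_counter, List.foldl_map, List.foldl_map]
  have hstep : (fun (corrected : List Int) (b : Int) =>
        if (((idx.filter (fun i => PySem.Int.floordiv i bs == b)).length : Int) ≤ t) then
          (idx.filter (fun i => PySem.Int.floordiv i bs == b)).foldl PySem.Set.add corrected
        else corrected)
      = (fun (s : List Int) (b : Int) =>
        if (((idx.map (fun i => PySem.Int.floordiv i bs)).count b : Int) ≤ t) then
          idx.foldl (fun s2 index =>
            if PySem.Int.floordiv index bs == b then PySem.Set.add s2 index else s2) s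
        else s) := by
    funext s b
    rw [count_map_key, List.foldl_filter]
  rw [hstep]
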